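-- pv_equiv track=rewrite | github.com/harsh6754/DSA-Problems | hackerrank/FindKthNumber.py | find_kth_value
-- ===== SOURCE A (Python) =====
-- def division(i, div):
--    return any(i % x == 0 for x in div)
--
-- def find_kth_value(n, div, k):
--    if k < 2:
--        return -1
--
--    i = 1
--    while k:
--        i += 1
--        if division(i, div):
--            k -= 1
--
--    return i
-- ===== SOURCE B (Python) =====
-- def find_kth_value(n, div, k):
--     if k < 2:
--         return -1
--     ds = sorted({abs(d) for d in div})
--     cur = [2 if d == 1 else d for d in ds]
--     while True:
--         m = min(cur)
--         k -= 1
--         if k == 0: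
--             return m
--         cur = [c + d if c == m else c for c, d in zip(cur, ds)]
-- ===== Notes on version B (the rewrite author's own statement) =====
-- stated objective: faster
-- what changed: A scans every integer upward testing each against all divisors; B merges the per-divisor streams of multiples (one pointer per distinct absolute divisor, advanced by repeatedly taking the minimum), so only actual multiples are visited.
-- outside the precondition, e.g. on find_kth_value(0, [1, 0], 2): A returns 3, B returns 0; on find_kth_value(0, [2, 0], 2): A raises ZeroDivisionError, B returns 0
import Mathlib
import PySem

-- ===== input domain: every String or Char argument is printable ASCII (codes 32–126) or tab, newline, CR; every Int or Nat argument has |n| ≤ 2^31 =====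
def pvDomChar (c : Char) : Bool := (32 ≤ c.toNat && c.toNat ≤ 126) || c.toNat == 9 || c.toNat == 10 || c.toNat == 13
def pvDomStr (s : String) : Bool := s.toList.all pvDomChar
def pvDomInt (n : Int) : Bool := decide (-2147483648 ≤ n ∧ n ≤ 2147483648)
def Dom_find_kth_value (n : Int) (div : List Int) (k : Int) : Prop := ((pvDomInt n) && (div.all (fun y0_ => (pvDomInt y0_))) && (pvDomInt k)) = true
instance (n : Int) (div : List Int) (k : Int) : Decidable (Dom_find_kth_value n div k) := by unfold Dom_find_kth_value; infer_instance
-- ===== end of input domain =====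

-- B merges the per-divisor streams of multiples (one pointer per distinct |divisor|,
-- advanced by taking the minimum) instead of A's scan of every integer upward.

-- ===== PORT A =====
def pyDivision (i : Int) (div : List Int) : Bool :=
  div.any (fun x => PySem.Int.mod i x == 0)

-- fuel only makes the while-loop total; under Pre_ it is proved sufficient
def loopA (div : List Int) : Nat → Int → Int → Int
  | 0, i, _ => i
  | fuel+1, i, k =>
    if k = 0 then i
    else if pyDivision (i+1) div then loopA div fuel (i+1) (k-1)
    else loopA div fuel (i+1) k

def find_kth_value (n : Int) (div : List Int) (k : Int) : Int :=
  if k < 2 then -1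
  else loopA div ((div.headD 1).natAbs * k.toNat + 2) 1 k

-- ===== PORT B =====
-- the loop runs exactly k iterations, so k (as Nat) is the structural counter
def loopB (ds : List Int) : Nat → List Int → Int
  | 0, _ => 0
  | 1, cur => (PySem.List.min? cur (fun x => x)).getD 0
  | (nn+2), cur =>
    let m := (PySem.List.min? cur (fun x => x)).getD 0
    loopB ds (nn+1) ((cur.zip ds).map (fun cd => if cd.1 = m then cd.1 + cd.2 else cd.1))

def find_kth_value_alt (n : Int) (div : List Int) (k : Int) : Int :=
  if k < 2 then -1
  else
    let ds := PySem.List.sorted (PySem.Set.ofList (div.map (fun d => |d|))) (fun x => x) false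
    loopB ds k.toNat (ds.map (fun d => if d = 1 then 2 else d))

-- ===== PRECONDITION & SPEC =====
-- Pre_ excludes (only when the loop is entered, k ≥ 2) an empty div, on which A loops
-- forever, and any div containing 0, on which A raises ZeroDivisionError unless an
-- earlier divisor happens to short-circuit the `any` forever (an accident of list order).
def Pre_find_kth_value (n : Int) (div : List Int) (k : Int) : Prop :=
  2 ≤ k → (div ≠ [] ∧ (0:Int) ∉ div)
instance (n : Int) (div : List Int) (k : Int) : Decidable (Pre_find_kth_value n div k) := by
  unfold Pre_find_kth_value; infer_instance

def pvWitness_find_kth_value : Int × List Int × Int := (10, [3, 5], 4)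

def Spec_find_kth_value (n : Int) (div : List Int) (k : Int) (out : Int) : Prop :=
  out = find_kth_value_alt n div k
instance (n : Int) (div : List Int) (k : Int) (out : Int) : Decidable (Spec_find_kth_value n div k out) := by
  unfold Spec_find_kth_value; infer_instance

-- ===== CLAIM (what is proved, stated in full; the proofs are below) =====
def Claim_equal_find_kth_value : Prop := ∀ (n : Int) (div : List Int) (k : Int), Dom_find_kth_value n div k → Pre_find_kth_value n div k → Spec_find_kth_value n div k (find_kth_value n div k)

-- ===== LEMMAS AND PROOFS =====

-- `pyDivision j div` is divisibility by some element
theorem pyDivision_iff (j : Int) (div : List Int) :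
    pyDivision j div = true ↔ ∃ d ∈ div, d ∣ j := by
  simp [pyDivision, PySem.Int.mod_eq_zero_iff_dvd]

-- the least divisible integer strictly above p
def IsNext (div : List Int) (p m : Int) : Prop :=
  p < m ∧ pyDivision m div = true ∧ ∀ j, p < j → j < m → pyDivision j div = false

theorem isNext_unique {div : List Int} {p m m' : Int}
    (h : IsNext div p m) (h' : IsNext div p m') : m = m' := by
  rcases h with ⟨hpm, hdm, hmin⟩
  rcases h' with ⟨hpm', hdm', hmin'⟩
  rcases lt_trichotomy m m' with hlt | heq | hgt
  · have := hmin' m hpm hlt; simp [hdm] at this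
  · exact heq
  · have := hmin m' hpm' hgt; simp [hdm'] at this

-- linear search for the next divisible integer (proof-side helper)
def gN (div : List Int) : Nat → Int → Int
  | 0, p => p + 1
  | f+1, p => if pyDivision (p+1) div then p+1 else gN div f (p+1)

def g (div : List Int) (p : Int) : Int := gN div ((div.headD 1).natAbs) p

theorem gN_isNext (div : List Int) :
    ∀ (f : Nat) (p : Int), (∃ t : Nat, 1 ≤ t ∧ t ≤ f ∧ pyDivision (p + (t:Int)) div = true) →
      IsNext div p (gN div f p) := by
  intro f
  induction f with
  | zero => rintro p ⟨t, ht1, ht0, _⟩; omega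
  | succ f ih =>
    rintro p ⟨t, ht1, htf, htd⟩
    by_cases h1 : pyDivision (p+1) div = true
    · rw [show gN div (f+1) p = p + 1 from by simp [gN, h1]]
      exact ⟨by omega, h1, fun j hj1 hj2 => by omega⟩
    · have ht1' : t ≠ 1 := by
        intro he; subst he; simp at htd; exact h1 htd
      have hex : ∃ t' : Nat, 1 ≤ t' ∧ t' ≤ f ∧ pyDivision ((p+1) + (t':Int)) div = true := by
        refine ⟨t - 1, by omega, by omega, ?_⟩
        have : (p+1) + ((t-1 : Nat) : Int) = p + (t:Int) := by push_cast; omega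
        rw [this]; exact htd
      have hn := ih (p+1) hex
      rcases hn with ⟨ha, hb, hc⟩
      rw [show gN div (f+1) p = gN div f (p+1) from by simp [gN, h1]]
      refine ⟨by omega, hb, ?_⟩
      intro j hj1 hj2
      by_cases hj : j = p + 1
      · subst hj; simpa using h1
      · exact hc j (by omega) hj2

theorem ex_window {div : List Int} {d : Int} (hd : d ∈ div) (h0 : d ≠ 0) (p : Int) :
    ∃ t : Nat, 1 ≤ t ∧ t ≤ d.natAbs ∧ pyDivision (p + (t:Int)) div = true := by
  set a : Int := |d| with ha
  have hna : a = (d.natAbs : Int) := by rw [ha]; exact Int.abs_eq_natAbs d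
  have ha1 : 1 ≤ a := by have := abs_pos.mpr h0; omega
  have hmodnn : 0 ≤ p % a := Int.emod_nonneg p (by omega)
  have hmodlt : p % a < a := Int.emod_lt_of_pos p (by omega)
  refine ⟨(a - p % a).toNat, by omega, by omega, ?_⟩
  rw [pyDivision_iff]
  refine ⟨d, hd, ?_⟩
  have heq : p + ((a - p % a).toNat : Int) = a * (p / a) + a := by
    have := Int.emod_def p a
    omega
  rw [heq]
  have : d ∣ a := by rw [ha]; exact (dvd_abs d d).mpr dvd_rfl
  exact Dvd.dvd.add (this.mul_right _) this

theorem g_isNext {div : List Int} (hne : div ≠ []) (h0 : (0:Int) ∉ div) (p : Int) :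
    IsNext div p (g div p) := by
  rcases List.exists_cons_of_ne_nil hne with ⟨h, t, rfl⟩
  have hh : h ∈ h :: t := List.mem_cons_self
  have hh0 : h ≠ 0 := fun he => h0 (he ▸ hh)
  exact gN_isNext _ _ _ (by simpa using ex_window hh hh0 p)

theorem g_gt {div : List Int} (hne : div ≠ []) (h0 : (0:Int) ∉ div) (p : Int) :
    p < g div p := (g_isNext hne h0 p).1

theorem g_le_window {div : List Int} (hne : div ≠ []) (h0 : (0:Int) ∉ div) (p : Int) :
    g div p ≤ p + ((div.headD 1).natAbs : Int) := by
  rcases List.exists_cons_of_ne_nil hne with ⟨h, t, rfl⟩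
  have hh : h ∈ h :: t := List.mem_cons_self
  have hh0 : h ≠ 0 := fun he => h0 (he ▸ hh)
  rcases ex_window hh hh0 p with ⟨s, hs1, hs2, hsd⟩
  rcases g_isNext hne h0 p with ⟨hgt, _, hmin⟩
  have hcast : (s : Int) ≤ (h.natAbs : Int) := by exact_mod_cast hs2
  simp only [List.headD_cons]
  by_contra hc
  rw [not_le] at hc
  have := hmin (p + (s:Int)) (by omega) (by omega)
  simp [this] at hsd

theorem g_eq_of_div {div : List Int} (hne : div ≠ []) (h0 : (0:Int) ∉ div) {p : Int}
    (h : pyDivision (p+1) div = true) : g div p = p + 1 :=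
  isNext_unique (g_isNext hne h0 p) ⟨by omega, h, by intro j h1 h2; omega⟩

theorem g_shift {div : List Int} (hne : div ≠ []) (h0 : (0:Int) ∉ div) {p : Int}
    (h : pyDivision (p+1) div = false) : g div (p+1) = g div p := by
  rcases g_isNext hne h0 p with ⟨hgt, hdv, hmin⟩
  have hne1 : g div p ≠ p + 1 := fun he => by rw [he] at hdv; simp [hdv] at h
  exact isNext_unique (g_isNext hne h0 (p+1))
    ⟨by omega, hdv, fun j h1 h2 => hmin j (by omega) h2⟩

theorem iter_ge {div : List Int} (hne : div ≠ []) (h0 : (0:Int) ∉ div) :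
    ∀ (c : Nat) (p : Int), p ≤ (g div)^[c] p := by
  intro c
  induction c with
  | zero => simp
  | succ c ih =>
    intro p
    rw [Function.iterate_succ_apply]
    exact le_trans (le_of_lt (g_gt hne h0 p)) (ih (g div p))

theorem iter_lt {div : List Int} (hne : div ≠ []) (h0 : (0:Int) ∉ div)
    (c : Nat) (hc : 1 ≤ c) (p : Int) : p < (g div)^[c] p := by
  rcases Nat.exists_eq_add_of_le hc with ⟨c', rfl⟩
  rw [add_comm, Function.iterate_succ_apply]
  exact lt_of_lt_of_le (g_gt hne h0 p) (iter_ge hne h0 c' (g div p))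

theorem iter_bound {div : List Int} (hne : div ≠ []) (h0 : (0:Int) ∉ div) :
    ∀ (c : Nat) (p : Int), (g div)^[c] p ≤ p + ((div.headD 1).natAbs : Int) * c := by
  intro c
  induction c with
  | zero => simp
  | succ c ih =>
    intro p
    rw [Function.iterate_succ_apply]
    have h1 := ih (g div p)
    have h2 := g_le_window hne h0 p
    have h3 : (((div.headD 1).natAbs : Int)) * ((c+1 : Nat) : Int) =
        ((div.headD 1).natAbs : Int) * (c : Int) + ((div.headD 1).natAbs : Int) := by
      push_cast; ring
    rw [h3]
    omega

-- A's while-loop computes the k-th iterate of `g`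
theorem loopA_eq {div : List Int} (hne : div ≠ []) (h0 : (0:Int) ∉ div) :
    ∀ (fuel : Nat) (c : Nat) (i : Int), ((g div)^[c] i - i).toNat ≤ fuel →
      loopA div fuel i (c:Int) = (g div)^[c] i := by
  intro fuel
  induction fuel with
  | zero =>
    intro c i hf
    match c with
    | 0 => simp [loopA]
    | c'+1 =>
      have := iter_lt hne h0 (c'+1) (by omega) i
      omega
  | succ f ih =>
    intro c i hf
    match c with
    | 0 => simp [loopA]
    | c'+1 =>
      have hk0 : ((c'+1 : Nat) : Int) ≠ 0 := by positivity
      have hstep : (g div)^[c'+1] i = (g div)^[c'] (g div i) := Function.iterate_succ_apply _ _ _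
      by_cases hdv : pyDivision (i+1) div = true
      · have hg : g div i = i + 1 := g_eq_of_div hne h0 hdv
        have hXi : i < (g div)^[c'+1] i := iter_lt hne h0 (c'+1) (by omega) i
        have hrec : loopA div f (i+1) ((c' : Nat) : Int) = (g div)^[c'] (i+1) := by
          apply ih
          have hge : i + 1 ≤ (g div)^[c'] (i+1) := by
            have := iter_ge hne h0 c' (i+1); omega
          have : (g div)^[c'] (i+1) = (g div)^[c'+1] i := by rw [hstep, hg]
          omega
        have hcast : ((c'+1 : Nat) : Int) - 1 = ((c' : Nat) : Int) := by push_cast; ring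
        simp only [loopA, hk0, if_false, hdv, if_true, hcast, hrec]
        rw [hstep, hg]
      · have hdf : pyDivision (i+1) div = false := by simpa using hdv
        have hg2 : g div i ≠ i + 1 := by
          intro he
          have := (g_isNext hne h0 i).2.1
          rw [he] at this; simp [this] at hdf
        have hgi : i + 1 < g div i := by have := g_gt hne h0 i; omega
        have hsh : (g div)^[c'+1] (i+1) = (g div)^[c'+1] i := by
          rw [Function.iterate_succ_apply, Function.iterate_succ_apply, g_shift hne h0 hdf]
        have hXi2 : i + 1 < (g div)^[c'+1] i := by
          rw [hstep]
          exact lt_of_lt_of_le hgi (iter_ge hne h0 c' (g div i))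
        have hrec : loopA div f (i+1) ((c'+1 : Nat) : Int) = (g div)^[c'+1] (i+1) := by
          apply ih
          rw [hsh]; omega
        simp only [loopA, hk0, if_false, hdf, Bool.false_eq_true, hrec, hsh]

-- pointer invariant for B: each cur entry is the least multiple of its divisor above p
def curRel (p d c : Int) : Prop := d ∣ c ∧ p < c ∧ c - d ≤ p

theorem mult_least {d c x p : Int} (hd : 1 ≤ d) (hdc : d ∣ c) (hdx : d ∣ x)
    (hcp : c - d ≤ p) (hpx : p < x) : c ≤ x := by
  by_contra hc
  have hdvd : d ∣ c - x := hdc.sub hdx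
  have : d ≤ c - x := Int.le_of_dvd (by omega) hdvd
  omega

theorem forall₂_mem_left {R : Int → Int → Prop} :
    ∀ {ds cur : List Int}, List.Forall₂ R ds cur → ∀ d ∈ ds, ∃ c ∈ cur, R d c := by
  intro ds cur h
  induction h with
  | nil => intro d hd; simp at hd
  | cons hr _ ih =>
    intro d hd
    rcases List.mem_cons.mp hd with rfl | hd'
    · exact ⟨_, List.mem_cons_self, hr⟩
    · rcases ih d hd' with ⟨c, hc, hrc⟩
      exact ⟨c, List.mem_cons_of_mem _ hc, hrc⟩

theorem forall₂_mem_right {R : Int → Int → Prop} :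
    ∀ {ds cur : List Int}, List.Forall₂ R ds cur → ∀ c ∈ cur, ∃ d ∈ ds, R d c := by
  intro ds cur h
  induction h with
  | nil => intro c hc; simp at hc
  | cons hr _ ih =>
    intro c hc
    rcases List.mem_cons.mp hc with rfl | hc'
    · exact ⟨_, List.mem_cons_self, hr⟩
    · rcases ih c hc' with ⟨d, hd, hrd⟩
      exact ⟨d, List.mem_cons_of_mem _ hd, hrd⟩

theorem min_cur {div ds cur : List Int} {p m : Int}
    (hmem : ∀ j, pyDivision j div = true ↔ ∃ d ∈ ds, d ∣ j)
    (hpos : ∀ d ∈ ds, 1 ≤ d)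
    (hdsne : ds ≠ [])
    (hcur : List.Forall₂ (curRel p) ds cur)
    (hnext : IsNext div p m) :
    (PySem.List.min? cur (fun x => x)).getD 0 = m ∧ ∀ c ∈ cur, m ≤ c := by
  have hcne : cur ≠ [] := by
    intro he
    rw [he] at hcur
    cases hcur
    exact hdsne rfl
  obtain ⟨mn, hmn⟩ : ∃ mn, PySem.List.min? cur (fun x => x) = some mn := by
    cases he : PySem.List.min? cur (fun x => x) with
    | none => exact absurd ((PySem.List.min?_eq_none_iff cur (fun x => x)).mp he) hcne
    | some v => exact ⟨v, rfl⟩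
  have hmem_mn : mn ∈ cur := PySem.List.min?_mem hmn
  have hmin_mn : ∀ y ∈ cur, mn ≤ y := by
    intro y hy; exact PySem.List.min?_isMin hmn y hy
  rcases hnext with ⟨hpm, hdm, hminm⟩
  -- m ≤ mn
  rcases forall₂_mem_right hcur mn hmem_mn with ⟨d, hd, hdc, hpc, hcd⟩
  have hdvmn : pyDivision mn div = true := (hmem mn).mpr ⟨d, hd, hdc⟩
  have hm_le : m ≤ mn := by
    by_contra hcon
    have := hminm mn hpc (by omega)
    simp [hdvmn] at this
  -- mn ≤ m
  rcases (hmem m).mp hdm with ⟨d', hd', hd'm⟩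
  rcases forall₂_mem_left hcur d' hd' with ⟨c, hc, hdc', hpc', hcd'⟩
  have hcm : c ≤ m := mult_least (hpos d' hd') hdc' hd'm hcd' hpm
  have hmn_le : mn ≤ m := le_trans (hmin_mn c hc) hcm
  have hmn_eq : mn = m := le_antisymm hmn_le hm_le
  subst hmn_eq
  exact ⟨by simp [hmn], hmin_mn⟩

theorem advance_cur {ds cur : List Int} {p m : Int}
    (hpos : ∀ d ∈ ds, 1 ≤ d)
    (hpm : p < m)
    (hle : ∀ c ∈ cur, m ≤ c)
    (hcur : List.Forall₂ (curRel p) ds cur) :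
    List.Forall₂ (curRel m) ds
      ((cur.zip ds).map (fun cd => if cd.1 = m then cd.1 + cd.2 else cd.1)) := by
  induction hcur with
  | nil => simp
  | @cons d c ds' cur' hr hf ih =>
    have hd1 : 1 ≤ d := hpos d List.mem_cons_self
    rcases hr with ⟨hdc, hpc, hcd⟩
    simp only [List.zip_cons_cons, List.map_cons]
    refine List.Forall₂.cons ?_ ?_
    · by_cases hcm : c = m
      · rw [if_pos hcm]
        subst hcm
        exact ⟨hdc.add dvd_rfl, by omega, by omega⟩
      · rw [if_neg hcm]
        have hmc : m < c := lt_of_le_of_ne (hle c List.mem_cons_self) (Ne.symm hcm)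
        exact ⟨hdc, hmc, by omega⟩
    · exact ih (fun d' hd' => hpos d' (List.mem_cons_of_mem _ hd'))
        (fun c' hc' => hle c' (List.mem_cons_of_mem _ hc'))

theorem loopB_eq {div ds : List Int} (hne : div ≠ []) (h0 : (0:Int) ∉ div)
    (hmem : ∀ j, pyDivision j div = true ↔ ∃ d ∈ ds, d ∣ j)
    (hpos : ∀ d ∈ ds, 1 ≤ d) (hdsne : ds ≠ []) :
    ∀ (nn : Nat), 1 ≤ nn → ∀ (p : Int) (cur : List Int),
      List.Forall₂ (curRel p) ds cur → loopB ds nn cur = (g div)^[nn] p := by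
  intro nn
  induction nn with
  | zero => omega
  | succ n ih =>
    intro _ p cur hcur
    have hnx := g_isNext hne h0 p
    have hmin := min_cur hmem hpos hdsne hcur hnx
    match n with
    | 0 =>
      show loopB ds 1 cur = (g div)^[1] p
      simp only [loopB, hmin.1, Function.iterate_one]
    | n'+1 =>
      show loopB ds (n'+2) cur = (g div)^[n'+2] p
      have hadv := advance_cur hpos (g_gt hne h0 p) hmin.2 hcur
      simp only [loopB]
      rw [hmin.1]
      rw [ih (by omega) (g div p) _ hadv, ← Function.iterate_succ_apply]

-- ===== VERDICT (by name: the statement is the Claim_ definition above) =====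
theorem find_kth_value_spec : Claim_equal_find_kth_value := by
  intro n div k _ hpre
  unfold Spec_find_kth_value find_kth_value find_kth_value_alt
  by_cases hk : k < 2
  · simp [hk]
  · have hk2 : 2 ≤ k := by omega
    rcases hpre hk2 with ⟨hne, h0⟩
    simp only [if_neg hk]
    set ds := PySem.List.sorted (PySem.Set.ofList (div.map (fun d => |d|))) (fun x => x) false with hds
    have hmem_ds : ∀ x, x ∈ ds ↔ ∃ d ∈ div, x = |d| := by
      intro x
      rw [hds, PySem.List.mem_sorted, PySem.Set.mem_ofList]
      simp [eq_comm]
    have hmem : ∀ j, pyDivision j div = true ↔ ∃ d ∈ ds, d ∣ j := by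
      intro j
      rw [pyDivision_iff]
      constructor
      · rintro ⟨d, hd, hdj⟩
        exact ⟨|d|, (hmem_ds _).mpr ⟨d, hd, rfl⟩, (abs_dvd d j).mpr hdj⟩
      · rintro ⟨x, hx, hxj⟩
        rcases (hmem_ds x).mp hx with ⟨d, hd, rfl⟩
        exact ⟨d, hd, (abs_dvd d j).mp hxj⟩
    have hpos : ∀ d ∈ ds, 1 ≤ d := by
      intro x hx
      rcases (hmem_ds x).mp hx with ⟨d, hd, rfl⟩
      have h1 : d ≠ 0 := fun he => h0 (he ▸ hd)
      have := abs_pos.mpr h1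
      omega
    have hdsne : ds ≠ [] := by
      rcases List.exists_cons_of_ne_nil hne with ⟨h, t, rfl⟩
      intro he
      have : |h| ∈ ds := (hmem_ds _).mpr ⟨h, List.mem_cons_self, rfl⟩
      rw [he] at this; simp at this
    -- initial pointers satisfy the invariant at p = 1
    have hinit : List.Forall₂ (curRel 1) ds (ds.map (fun d => if d = 1 then 2 else d)) := by
      rw [List.forall₂_map_right_iff, List.forall₂_same]
      intro d hd
      have h1 : 1 ≤ d := hpos d hd
      by_cases hd1 : d = 1
      · subst hd1; simp [curRel]
      · simp only [if_neg hd1]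
        exact ⟨dvd_rfl, by omega, by omega⟩
    set c : Nat := k.toNat with hc
    have hck : (c : Int) = k := Int.toNat_of_nonneg (by omega)
    have hc1 : 1 ≤ c := by omega
    -- B computes the c-th iterate
    have hB : loopB ds c (ds.map (fun d => if d = 1 then 2 else d)) = (g div)^[c] 1 :=
      loopB_eq hne h0 hmem hpos hdsne c hc1 1 _ hinit
    -- A computes the c-th iterate (fuel is sufficient)
    have hfuel : ((g div)^[c] 1 - 1).toNat ≤ (div.headD 1).natAbs * c + 2 := by
      have hb := iter_bound hne h0 c 1
      have hge := iter_ge hne h0 c 1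
      have hcast : (((div.headD 1).natAbs * c : Nat) : Int) = |div.headD 1| * (c : Int) := by
        push_cast; ring
      push_cast at hb
      omega
    have hA : loopA div ((div.headD 1).natAbs * c + 2) 1 ((c:Int)) = (g div)^[c] 1 :=
      loopA_eq hne h0 _ c 1 hfuel
    rw [hck] at hA
    rw [hA, hB]
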